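-- pv_equiv track=rewrite | github.com/AlessandroRuzza/ETH_Qhack_26_Quantum_Icing | 2026/syntesis_part3.py | estimated_injected_depth
-- ===== SOURCE A (Python) =====
-- def estimated_injected_depth(sequence):
--     depth = 0
--
--     for gate_name in sequence:
--         if gate_name in {"h", "s", "x"}:
--             depth += 1
--         elif gate_name == "sdg":
--             depth += 3
--         elif gate_name == "t":
--             # H/T ancilla prep, CNOT, measurement, and worst-case feed-forward S.
--             depth += 5
--         elif gate_name == "tdg":
--             # T-injection plus three S gates implementing S^\dagger.
--             depth += 8
--
--     return depth
-- ===== SOURCE B (Python) =====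
-- def estimated_injected_depth(sequence):
--     counts = {}
--     for g in sequence:
--         counts[g] = counts.get(g, 0) + 1
--     weights = {"h": 1, "s": 1, "x": 1, "sdg": 3, "t": 5, "tdg": 8}
--     return sum(counts.get(name, 0) * w for name, w in weights.items())
-- ===== Notes on version B (the rewrite author's own statement) =====
-- stated objective: idiomatic
-- what changed: B builds a frequency table of gate names in one pass and then returns a dot product over the fixed weight table's entries, instead of A's per-element if/elif accumulation over the sequence.
import Mathlib
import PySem

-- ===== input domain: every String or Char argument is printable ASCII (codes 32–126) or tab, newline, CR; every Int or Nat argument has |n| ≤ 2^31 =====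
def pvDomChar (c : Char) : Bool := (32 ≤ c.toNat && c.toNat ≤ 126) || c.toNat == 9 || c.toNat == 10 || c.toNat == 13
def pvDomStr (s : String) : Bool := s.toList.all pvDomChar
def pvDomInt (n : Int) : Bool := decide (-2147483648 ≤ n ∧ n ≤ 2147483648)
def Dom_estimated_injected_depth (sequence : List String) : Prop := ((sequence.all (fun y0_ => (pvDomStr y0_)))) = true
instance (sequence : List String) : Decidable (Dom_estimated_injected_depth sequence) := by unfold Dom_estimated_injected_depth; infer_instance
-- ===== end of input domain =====

-- B tabulates gate-name frequencies in one pass and returns a dot product over the fixed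
-- weight table, instead of A's per-element if/elif accumulation (objective: idiomatic).

-- ===== PORT A =====
def estimated_injected_depth (sequence : List String) : Int :=
  sequence.foldl
    (fun depth gate_name =>
      if gate_name == "h" || gate_name == "s" || gate_name == "x" then depth + 1
      else if gate_name == "sdg" then depth + 3
      else if gate_name == "t" then depth + 5
      else if gate_name == "tdg" then depth + 8
      else depth)
    0

-- ===== PORT B =====
def estimated_injected_depth_alt (sequence : List String) : Int :=
  let counts : PySem.Dict String Int :=
    sequence.foldl (fun d g => d.insert g (d.getD g 0 + 1)) PySem.Dict.empty
  let weights : PySem.Dict String Int :=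
    ((((((PySem.Dict.empty).insert "h" 1).insert "s" 1).insert "x" 1).insert "sdg" 3).insert "t" 5).insert "tdg" 8
  (weights.items.map (fun nw => counts.getD nw.1 0 * nw.2)).sum

-- ===== PRECONDITION & SPEC =====
def Spec_estimated_injected_depth (sequence : List String) (out : Int) : Prop := out = estimated_injected_depth_alt sequence
instance (sequence : List String) (out : Int) : Decidable (Spec_estimated_injected_depth sequence out) := by unfold Spec_estimated_injected_depth; infer_instance

-- ===== CLAIM (what is proved, stated in full; the proofs are below) =====
def Claim_equal_estimated_injected_depth : Prop := ∀ (sequence : List String), Dom_estimated_injected_depth sequence → Spec_estimated_injected_depth sequence (estimated_injected_depth sequence)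

-- ===== LEMMAS AND PROOFS =====

-- A's fold, with the accumulator generalized, equals the weighted count formula.
theorem pv_A_foldl (l : List String) (a : Int) :
    l.foldl
      (fun depth gate_name =>
        if gate_name == "h" || gate_name == "s" || gate_name == "x" then depth + 1
        else if gate_name == "sdg" then depth + 3
        else if gate_name == "t" then depth + 5
        else if gate_name == "tdg" then depth + 8
        else depth)
      a
    = a + (l.count "h" : Int) + l.count "s" + l.count "x"
        + 3 * l.count "sdg" + 5 * l.count "t" + 8 * l.count "tdg" := by
  induction l generalizing a with
  | nil => simp
  | cons g tl ih =>
    simp only [List.foldl_cons, ih, List.count_cons]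
    by_cases h1 : g = "h" <;> by_cases h2 : g = "s" <;> by_cases h3 : g = "x" <;>
      by_cases h4 : g = "sdg" <;> by_cases h5 : g = "t" <;> by_cases h6 : g = "tdg" <;>
      simp_all <;> ring_nf

theorem pv_B_eq (sequence : List String) :
    estimated_injected_depth_alt sequence
    = (sequence.count "h" : Int) + sequence.count "s" + sequence.count "x"
        + 3 * sequence.count "sdg" + 5 * sequence.count "t" + 8 * sequence.count "tdg" := by
  unfold estimated_injected_depth_alt
  simp only [PySem.Dict.getD_foldl_insert_add_one]
  simp [PySem.Dict.insert, PySem.Dict.empty, PySem.Dict.getD, PySem.Dict.get?]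
  ring

-- ===== VERDICT (by name: the statement is the Claim_ definition above) =====
theorem estimated_injected_depth_spec : Claim_equal_estimated_injected_depth := by
  intro sequence _
  show estimated_injected_depth sequence = estimated_injected_depth_alt sequence
  rw [estimated_injected_depth, pv_A_foldl, pv_B_eq]
  ring
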